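-- pv_equiv track=rewrite | github.com/ayaan-rulhania/atlas-ai | apps/chatbot/refinement/answer_refiner.py | strip_duplicate_sections
-- ===== SOURCE A (Python) =====
-- def strip_duplicate_sections(answer: str) -> str:
--     seen = set()
--     lines = []
--     for line in answer.splitlines():
--         key = line.strip().lower()
--         if key in seen and key.startswith("_sources:_"):
--             continue
--         seen.add(key)
--         lines.append(line)
--     return "\n".join(lines)
-- ===== SOURCE B (Python) =====
-- def strip_duplicate_sections(answer: str) -> str:
--     lines = answer.splitlines()
--     groups = {}
--     for i, line in enumerate(lines):
--         groups.setdefault(line.strip().lower(), []).append(i)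
--     keep = []
--     for key, idxs in groups.items():
--         keep.extend(idxs[:1] if key.startswith("_sources:_") else idxs)
--     keep.sort()
--     return "\n".join(lines[i] for i in keep)
-- ===== Notes on version B (the rewrite author's own statement) =====
-- stated objective: alternative
-- what changed: Replaces the single forward pass carrying a running set of already-encountered keys by a group-by algorithm: bucket all line indices by normalized key in one dict pass, keep whole buckets for ordinary keys and only the first index of each sources-prefixed bucket, then sort the kept indices and rebuild the answer from them.
import Mathlib
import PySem

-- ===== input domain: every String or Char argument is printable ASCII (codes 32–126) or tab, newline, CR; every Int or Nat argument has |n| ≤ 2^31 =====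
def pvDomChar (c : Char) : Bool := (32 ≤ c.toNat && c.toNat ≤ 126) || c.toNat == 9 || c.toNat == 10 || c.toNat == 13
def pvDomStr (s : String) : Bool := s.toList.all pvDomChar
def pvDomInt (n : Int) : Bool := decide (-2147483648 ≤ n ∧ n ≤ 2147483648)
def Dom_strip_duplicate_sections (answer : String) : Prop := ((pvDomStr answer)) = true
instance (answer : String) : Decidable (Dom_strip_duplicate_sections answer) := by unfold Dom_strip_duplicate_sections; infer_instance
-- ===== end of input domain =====

-- B replaces A's single forward pass with a running seen-set by a group-by-key algorithm:
-- bucket all line indices by normalized key in a dict, keep every bucket of an ordinary key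
-- and only the first index of each sources-prefixed bucket, sort the kept indices and
-- rebuild (alternative decomposition, same cost class).

-- ===== PORT A =====
def strip_duplicate_sections (answer : String) : String :=
  let st := (PySem.Str.splitlines answer).foldl
    (fun (st : PySem.Set String × List String) line =>
      let key := PySem.Str.lower (PySem.Str.strip line)
      if PySem.Set.contains st.1 key && PySem.Str.startswith key "_sources:_" then st
      else (PySem.Set.add st.1 key, st.2 ++ [line]))
    (PySem.Set.empty, [])
  PySem.Str.join "\n" st.2

-- ===== PORT B =====
def strip_duplicate_sections_alt (answer : String) : String :=
  let lines := PySem.Str.splitlines answer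
  let groups := (PySem.List.enumerate lines).foldl
      (fun (d : PySem.Dict String (List Int)) p =>
        d.modify (PySem.Str.lower (PySem.Str.strip p.2)) [] (· ++ [p.1]))
      PySem.Dict.empty
  let keep := groups.items.foldl
      (fun (acc : List Int) kv =>
        acc ++ (if PySem.Str.startswith kv.1 "_sources:_" then PySem.List.slice kv.2 none (some 1) else kv.2)) []
  let keepS := PySem.List.sorted keep id false
  PySem.Str.join "\n" (keepS.map (fun i => PySem.List.pyGetD lines i ""))

-- ===== PRECONDITION & SPEC =====
def Spec_strip_duplicate_sections (answer : String) (out : String) : Prop := out = strip_duplicate_sections_alt answer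
instance (answer : String) (out : String) : Decidable (Spec_strip_duplicate_sections answer out) := by unfold Spec_strip_duplicate_sections; infer_instance

-- ===== CLAIM (what is proved, stated in full; the proofs are below) =====
def Claim_equal_strip_duplicate_sections : Prop := ∀ (answer : String), Dom_strip_duplicate_sections answer → Spec_strip_duplicate_sections answer (strip_duplicate_sections answer)

-- ===== LEMMAS AND PROOFS =====

-- the normalized key of a line, and the 'sources' test
def fKey (line : String) : String := PySem.Str.lower (PySem.Str.strip line)
def qSrc (k : String) : Bool := PySem.Str.startswith k "_sources:_"

-- the middle-ground specification both ports are reduced to: keep the enumerated line p iff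
-- its key is not sources-prefixed or p.1 is the first occurrence of its key in the key list
def psi (keys : List String) (p : Int × String) : Bool :=
  !qSrc (PySem.List.pyGetD keys p.1 "") ||
    ((PySem.List.index? keys (PySem.List.pyGetD keys p.1 "")).map Int.ofNat == some p.1)

-- A-side specification: process lines, carrying the list P of keys of all already-processed lines
def gSpec (f : String → String) (q : String → Bool) : List String → List String → List String
  | _, [] => []
  | P, l :: t =>
      (if P.contains (f l) && q (f l) then ([] : List String) else [l]) ++ gSpec f q (P ++ [f l]) t

theorem contains_append_singleton (P : List String) (k x : String) :
    (P ++ [k]).contains x = (P.contains x || x == k) := by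
  rw [List.contains_append, List.contains_cons, List.contains_nil, Bool.or_false]

theorem inv_step (s : PySem.Set String) (P : List String) (k : String)
    (h : ∀ x, PySem.Set.contains s x = P.contains x) :
    ∀ x, PySem.Set.contains (PySem.Set.add s k) x = (P ++ [k]).contains x := by
  intro x
  have hx : x ∈ s ↔ x ∈ P := by
    rw [← PySem.Set.contains_iff, h x]; exact List.contains_iff_mem
  rw [Bool.eq_iff_iff, PySem.Set.contains_iff, PySem.Set.mem_add,
    contains_append_singleton, Bool.or_eq_true, List.contains_iff_mem, hx, beq_iff_eq]

theorem contains_append_singleton_of_mem (P : List String) (k : String)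
    (h : P.contains k = true) (x : String) :
    (P ++ [k]).contains x = P.contains x := by
  rw [contains_append_singleton, Bool.eq_iff_iff, Bool.or_eq_true, beq_iff_eq]
  constructor
  · rintro (hx | rfl)
    · exact hx
    · exact h
  · intro hx; exact Or.inl hx

theorem foldA_eq_gSpec (f : String → String) (q : String → Bool) (ls : List String) :
    ∀ (s : PySem.Set String) (acc P : List String),
      (∀ x, PySem.Set.contains s x = P.contains x) →
      (ls.foldl
        (fun (st : PySem.Set String × List String) line =>
          if PySem.Set.contains st.1 (f line) && q (f line) then st
          else (PySem.Set.add st.1 (f line), st.2 ++ [line]))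
        (s, acc)).2
      = acc ++ gSpec f q P ls := by
  induction ls with
  | nil => intro s acc P _; simp [gSpec]
  | cons l t ih =>
    intro s acc P hP
    simp only [List.foldl_cons, gSpec]
    rw [hP (f l)]
    by_cases hc : (P.contains (f l) && q (f l)) = true
    · rw [if_pos hc, if_pos hc, List.nil_append]
      have hc1 : P.contains (f l) = true := (Bool.and_eq_true _ _ ▸ hc).1
      exact ih s acc (P ++ [f l]) (by
        intro x; rw [hP x, contains_append_singleton_of_mem P (f l) hc1])
    · rw [if_neg hc, if_neg hc]
      have := ih (PySem.Set.add s (f l)) (acc ++ [l]) (P ++ [f l]) (inv_step s P (f l) hP)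
      rw [this, List.append_assoc, List.singleton_append]

theorem index?_first (A B : List String) (k : String) (hk : k ∉ A) :
    PySem.List.index? (A ++ k :: B) k = some A.length :=
  (PySem.List.index?_eq_some_iff _ _ _).mpr ⟨A, B, rfl, rfl, hk⟩

theorem index?_lt_of_mem (A : List String) (k : String) (hk : k ∈ A) (B : List String) :
    ∃ j, PySem.List.index? (A ++ B) k = some j ∧ j < A.length := by
  have h1 : PySem.List.index? (A ++ B) k = PySem.List.index? A k :=
    PySem.List.index?_append_of_mem B hk
  rcases Option.isSome_iff_exists.mp ((PySem.List.index?_isSome_iff A k).mpr hk) with ⟨j, hj⟩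
  refine ⟨j, by rw [h1, hj], ?_⟩
  rcases (PySem.List.index?_eq_some_iff _ _ _).mp hj with ⟨pre, suf, heq, hlen, _⟩
  rw [heq]
  simp [← hlen]

theorem filt_eq_gSpec (f : String → String) (q : String → Bool) (suf : List String) :
    ∀ (pre keys : List String), keys = (pre ++ suf).map f →
      ((PySem.List.enumerate suf (pre.length : Int)).filter (fun p =>
          !q (PySem.List.pyGetD keys p.1 "") ||
            ((PySem.List.index? keys (PySem.List.pyGetD keys p.1 "")).map Int.ofNat == some p.1))).map (·.2)
      = gSpec f q (pre.map f) suf := by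
  induction suf with
  | nil => intro pre keys _; simp [gSpec, PySem.List.enumerate]
  | cons l t ih =>
    intro pre keys hkeys
    have hsplit : keys = pre.map f ++ f l :: t.map f := by simp [hkeys]
    have hk : PySem.List.pyGetD keys ((pre.length : Int)) "" = f l := by
      rw [PySem.List.pyGetD_natCast, hsplit, List.getD_eq_getElem?_getD,
        List.getElem?_append_right (by simp)]
      simp
    have hrec := ih (pre ++ [l]) keys (by simpa [List.append_assoc] using hkeys)
    simp only [List.length_append, List.length_cons, List.length_nil, List.map_append,
      List.map_cons, List.map_nil] at hrec
    push_cast at hrec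
    rw [PySem.List.enumerate_cons, List.filter_cons]
    simp only [hk, gSpec]
    by_cases hc : ((pre.map f).contains (f l) && q (f l)) = true
    · have hc' := hc
      simp only [Bool.and_eq_true] at hc'
      have hmem : f l ∈ pre.map f := List.contains_iff_mem.mp hc'.1
      rcases index?_lt_of_mem (pre.map f) (f l) hmem (f l :: t.map f) with ⟨j, hj, hjlt⟩
      rw [← hsplit] at hj
      have hcond : (!q (f l) ||
          ((PySem.List.index? keys (f l)).map Int.ofNat == some ((pre.length : Int)))) = false := by
        rw [hc'.2, hj]
        simp only [Bool.not_true, Bool.false_or, Option.map_some]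
        rw [beq_eq_false_iff_ne]
        intro h
        have hji : (j : Int) = (pre.length : Int) := by simpa using h
        have : j = pre.length := by exact_mod_cast hji
        rw [List.length_map] at hjlt
        omega
      rw [hcond, if_pos hc, List.nil_append, if_neg Bool.false_ne_true]
      exact hrec
    · have hcond : (!q (f l) ||
          ((PySem.List.index? keys (f l)).map Int.ofNat == some ((pre.length : Int)))) = true := by
        cases hcf : (pre.map f).contains (f l) with
        | false =>
          have hmem : f l ∉ pre.map f := fun hm => by
            rw [List.contains_iff_mem.mpr hm] at hcf; exact Bool.noConfusion hcf
          have hidx : PySem.List.index? keys (f l) = some (pre.map f).length := by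
            rw [hsplit]; exact index?_first _ _ _ hmem
          rw [hidx]
          simp
        | true =>
          have hqf : q (f l) = false := by
            cases hqv : q (f l) with
            | false => rfl
            | true => exact absurd (by rw [hcf, hqv]; rfl) hc
          rw [hqf]
          simp
      rw [hcond, if_neg hc, if_pos rfl, List.map_cons, hrec, List.singleton_append]

-- generic partition permutation: concatenating the key-buckets of xs over a Nodup key list
-- covering xs recovers xs up to permutation
theorem part_perm {α κ : Type} [BEq κ] [LawfulBEq κ] (g : α → κ) :
    ∀ (K : List κ) (xs : List α), K.Nodup → (∀ x ∈ xs, g x ∈ K) →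
      (K.flatMap (fun k => xs.filter (fun x => g x == k))).Perm xs := by
  intro K
  induction K with
  | nil =>
    intro xs _ hcov
    have : xs = [] := by
      cases xs with
      | nil => rfl
      | cons x t => exact absurd (hcov x List.mem_cons_self) (List.not_mem_nil)
    simp [this]
  | cons k K' ih =>
    intro xs hnd hcov
    rw [List.flatMap_cons]
    have hnd' : K'.Nodup := hnd.of_cons
    have hknotin : k ∉ K' := (List.nodup_cons.mp hnd).1
    set ys := xs.filter (fun x => !(g x == k)) with hys
    have hcov' : ∀ y ∈ ys, g y ∈ K' := by
      intro y hy
      rcases List.mem_filter.mp hy with ⟨hyx, hne⟩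
      rcases List.mem_cons.mp (hcov y hyx) with h | h
      · exfalso; simp [h] at hne
      · exact h
    have hfilt : ∀ k' ∈ K', xs.filter (fun x => g x == k') = ys.filter (fun x => g x == k') := by
      intro k' hk'
      rw [hys, List.filter_filter]
      apply List.filter_congr
      intro x _
      cases hgx : (g x == k') with
      | false => simp
      | true =>
        have hgk' : g x = k' := beq_iff_eq.mp hgx
        have hne : ¬ (g x == k) = true := by
          simp only [beq_iff_eq, hgk']
          rintro rfl; exact hknotin hk'
        simp [hne]
    have hperm' : (K'.flatMap (fun k' => xs.filter (fun x => g x == k'))).Perm ys := by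
      have heq : K'.flatMap (fun k' => xs.filter (fun x => g x == k'))
           = K'.flatMap (fun k' => ys.filter (fun x => g x == k')) := by
        simp only [List.flatMap]
        exact congrArg List.flatten (List.map_congr_left hfilt)
      rw [heq]; exact ih ys hnd' hcov'
    exact (List.Perm.append_left _ hperm').trans (List.filter_append_perm _ xs)

-- groups.getD: the bucket of key k is the (ordered) list of indices of lines with key k
theorem groups_getD (ls : List String) (k : String) :
    (((PySem.List.enumerate ls).foldl
        (fun (d : PySem.Dict String (List Int)) p => d.modify (fKey p.2) [] (· ++ [p.1]))
        PySem.Dict.empty).getD k [])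
      = ((PySem.List.enumerate ls).filter (fun p => fKey p.2 == k)).map (·.1) := by
  have hfold : (PySem.List.enumerate ls).foldl
        (fun (d : PySem.Dict String (List Int)) p => d.modify (fKey p.2) [] (· ++ [p.1]))
        PySem.Dict.empty
      = ((PySem.List.enumerate ls).map (fun p => (fKey p.2, p.1))).foldl
        (fun (d : PySem.Dict String (List Int)) r => d.modify r.1 [] (· ++ [r.2]))
        PySem.Dict.empty := by
    rw [List.foldl_map]
  rw [hfold, PySem.Dict.getD_foldl_modify_append, PySem.Dict.getD_empty, List.nil_append,
    List.filter_map, List.map_map]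
  rfl

-- groups.keys: the distinct keys
theorem groups_keys (ls : List String) :
    (((PySem.List.enumerate ls).foldl
        (fun (d : PySem.Dict String (List Int)) p => d.modify (fKey p.2) [] (· ++ [p.1]))
        PySem.Dict.empty).keys)
      = PySem.Set.ofList ((PySem.List.enumerate ls).map (fun p => fKey p.2)) := by
  rw [PySem.Dict.keys_foldl_modify_key]
  rw [PySem.Dict.keys_empty, PySem.Set.update_nil_left]

-- the kept index list is strictly increasing
theorem keptIdx_pairwise (ls : List String) :
    (((PySem.List.enumerate ls).filter (psi (ls.map fKey))).map (·.1)).Pairwise (· < ·) := by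
  have h : ((PySem.List.enumerate ls).filter (psi (ls.map fKey))).Pairwise
      (fun p q => p.1 < q.1) :=
    (PySem.List.pairwise_lt_enumerate ls 0).sublist (List.filter_sublist)
  rw [List.pairwise_map]
  exact h

-- key lookup on an enumerate member
theorem key_at_mem (ls : List String) (p : Int × String)
    (hp : p ∈ PySem.List.enumerate ls (0 : Int)) :
    PySem.List.pyGetD (ls.map fKey) p.1 "" = fKey p.2 := by
  rcases (PySem.List.mem_enumerate_iff ls 0 p).mp hp with ⟨kk, hkk, rfl⟩
  have h0 : ((0 : Int) + kk) = ((kk : Nat) : Int) := by simp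
  rw [h0, PySem.List.pyGetD_natCast]
  rw [List.getD_eq_getElem?_getD]
  simp [hkk]

-- line lookup on an enumerate member
theorem line_at_mem (ls : List String) (p : Int × String)
    (hp : p ∈ PySem.List.enumerate ls (0 : Int)) :
    PySem.List.pyGetD ls p.1 "" = p.2 := by
  rcases (PySem.List.mem_enumerate_iff ls 0 p).mp hp with ⟨kk, hkk, rfl⟩
  have h0 : ((0 : Int) + kk) = ((kk : Nat) : Int) := by simp
  rw [h0, PySem.List.pyGetD_natCast]
  rw [List.getD_eq_getElem?_getD]
  simp [hkk]

theorem filter_swap (ls : List String) (k : String) :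
    ((PySem.List.enumerate ls).filter (psi (ls.map fKey))).filter (fun p => fKey p.2 == k)
    = ((PySem.List.enumerate ls).filter (fun p => fKey p.2 == k)).filter (psi (ls.map fKey)) := by
  rw [List.filter_filter, List.filter_filter]
  apply List.filter_congr
  intro p _
  exact Bool.and_comm _ _

-- per-key: the selected part of the bucket of k equals the psi-filtered bucket of k
theorem sel_eq_filter (ls : List String) (k : String)
    (hkmem : ∃ p ∈ PySem.List.enumerate ls (0 : Int), fKey p.2 = k) :
    (if qSrc k
      then (((PySem.List.enumerate ls).filter (fun p => fKey p.2 == k)).map (·.1)).take 1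
      else ((PySem.List.enumerate ls).filter (fun p => fKey p.2 == k)).map (·.1))
    = ((((PySem.List.enumerate ls).filter (psi (ls.map fKey))).filter (fun p => fKey p.2 == k)).map (·.1)) := by
  rw [filter_swap]
  by_cases hq : qSrc k = true
  · rw [if_pos hq]
    have hkmem' : k ∈ ls.map fKey := by
      rcases hkmem with ⟨p, hp, hfp⟩
      rcases (PySem.List.mem_enumerate_iff ls 0 p).mp hp with ⟨kk, hkk, rfl⟩
      exact hfp ▸ List.mem_map_of_mem (by simp)
    rcases Option.isSome_iff_exists.mp
      ((PySem.List.index?_isSome_iff (ls.map fKey) k).mpr hkmem') with ⟨j0, hj0⟩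
    rcases (PySem.List.index?_eq_some_iff _ _ _).mp hj0 with ⟨pre, suf, hdec, hlen, hknotin⟩
    rcases List.map_eq_append_iff.mp hdec with ⟨lp, lrest, hls, hmlp, hmrest⟩
    rcases List.map_eq_cons_iff.mp hmrest with ⟨l0, lt, hrest, hfl0, hmlt⟩
    have hlplen : lp.length = j0 := by rw [← hlen, ← hmlp, List.length_map]
    have hE : PySem.List.enumerate ls (0 : Int)
        = PySem.List.enumerate lp 0 ++ PySem.List.enumerate (l0 :: lt) ((j0 : Int)) := by
      rw [hls, hrest, PySem.List.enumerate_append]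
      congr 1
      simp [hlplen]
    have hL : (PySem.List.enumerate ls).filter (fun p => fKey p.2 == k)
        = ((j0 : Int), l0) :: (PySem.List.enumerate lt ((j0 : Int) + 1)).filter (fun p => fKey p.2 == k) := by
      rw [hE, List.filter_append]
      have h1 : (PySem.List.enumerate lp (0 : Int)).filter (fun p => fKey p.2 == k) = [] := by
        rw [List.filter_eq_nil_iff]
        intro p hp
        rcases (PySem.List.mem_enumerate_iff lp 0 p).mp hp with ⟨kk, hkk, rfl⟩
        simp only [beq_iff_eq]
        intro hcontra
        apply hknotin
        rw [← hmlp, ← hcontra]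
        exact List.mem_map_of_mem (by simp)
      rw [h1, List.nil_append, PySem.List.enumerate_cons, List.filter_cons]
      simp [hfl0]
    rw [hL]
    have hpsihead : psi (ls.map fKey) ((j0 : Int), l0) = true := by
      have hget : PySem.List.pyGetD (ls.map fKey) ((j0 : Int)) "" = k := by
        rw [PySem.List.pyGetD_natCast, hdec, List.getD_eq_getElem?_getD,
          List.getElem?_append_right (by omega)]
        simp [hlen]
      simp only [psi, hget, hj0]
      simp
    have hpsitail : ∀ p ∈ (PySem.List.enumerate lt ((j0 : Int) + 1)).filter (fun p => fKey p.2 == k),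
        psi (ls.map fKey) p = false := by
      intro p hp
      rcases List.mem_filter.mp hp with ⟨hpe, hpk⟩
      have hpE : p ∈ PySem.List.enumerate ls (0 : Int) := by
        rw [hE, PySem.List.enumerate_cons]
        exact List.mem_append_right _ (List.mem_cons_of_mem _ hpe)
      have hget : PySem.List.pyGetD (ls.map fKey) p.1 "" = k := by
        rw [key_at_mem ls p hpE]; exact beq_iff_eq.mp hpk
      rcases (PySem.List.mem_enumerate_iff lt _ p).mp hpe with ⟨m, hm, rfl⟩
      simp only [psi, hget, hj0, hq]
      simp only [Bool.not_true, Bool.false_or, Option.map_some]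
      rw [beq_eq_false_iff_ne]
      intro hcontra
      have : ((j0 : Int)) = (j0 : Int) + 1 + m := by simpa using hcontra
      omega
    have htail : ((PySem.List.enumerate lt ((j0 : Int) + 1)).filter
        (fun p => fKey p.2 == k)).filter (psi (ls.map fKey)) = [] := by
      apply List.filter_eq_nil_iff.mpr
      intro p hp
      rw [hpsitail p hp]; exact Bool.false_ne_true
    rw [List.filter_cons_of_pos hpsihead, htail]
    simp
  · rw [if_neg hq]
    have hall : ((PySem.List.enumerate ls).filter (fun p => fKey p.2 == k)).filter (psi (ls.map fKey))
        = (PySem.List.enumerate ls).filter (fun p => fKey p.2 == k) := by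
      apply List.filter_eq_self.mpr
      intro p hp
      rcases List.mem_filter.mp hp with ⟨hpe, hpk⟩
      have hget : PySem.List.pyGetD (ls.map fKey) p.1 "" = k := by
        rw [key_at_mem ls p hpe]; exact beq_iff_eq.mp hpk
      simp only [psi, hget]
      simp [hq]
    rw [hall]

-- B's sorted keep list IS the psi-filtered index list
theorem keepS_eq (ls : List String) :
    PySem.List.sorted
      ((((PySem.List.enumerate ls).foldl
          (fun (d : PySem.Dict String (List Int)) p => d.modify (fKey p.2) [] (· ++ [p.1]))
          PySem.Dict.empty).items).foldl
        (fun (acc : List Int) kv =>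
          acc ++ (if qSrc kv.1 then PySem.List.slice kv.2 none (some 1) else kv.2)) [])
      id false
    = (((PySem.List.enumerate ls).filter (psi (ls.map fKey))).map (·.1)) := by
  set G := (PySem.List.enumerate ls).foldl
      (fun (d : PySem.Dict String (List Int)) p => d.modify (fKey p.2) [] (· ++ [p.1]))
      PySem.Dict.empty with hG
  set K := PySem.Set.ofList ((PySem.List.enumerate ls).map (fun p => fKey p.2)) with hK
  have hKnodup : K.Nodup := PySem.Set.nodup_ofList _
  have hkeys : G.keys = K := groups_keys ls
  have hitems : G.items = G.keys.map (fun k => (k, G.getD k [])) :=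
    PySem.Dict.items_eq_map_keys G (hkeys ▸ hKnodup) []
  rw [PySem.List.foldl_append_eq_flatMap, List.nil_append, hitems, hkeys]
  have hstep : (K.map (fun k => (k, G.getD k []))).flatMap (fun kv : String × List Int =>
        if qSrc kv.1 then PySem.List.slice kv.2 none (some 1) else kv.2)
      = K.flatMap (fun k =>
        ((((PySem.List.enumerate ls).filter (psi (ls.map fKey))).filter
            (fun p => fKey p.2 == k)).map (·.1))) := by
    rw [List.flatMap_map]
    simp only [List.flatMap]
    apply congrArg List.flatten
    apply List.map_congr_left
    intro k hkK
    have hreal : ∃ p ∈ PySem.List.enumerate ls (0 : Int), fKey p.2 = k := by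
      have := (PySem.Set.mem_ofList _ _).mp (hK ▸ hkK)
      rcases List.mem_map.mp this with ⟨p, hp, hfp⟩
      exact ⟨p, hp, hfp⟩
    have hgetD : G.getD k [] = ((PySem.List.enumerate ls).filter (fun p => fKey p.2 == k)).map (·.1) :=
      groups_getD ls k
    have hslice : PySem.List.slice (G.getD k []) none (some 1) = (G.getD k []).take 1 := by
      rw [PySem.List.slice_to _ (by norm_num)]
      norm_num
    rw [hslice]
    simp only [hgetD]
    exact sel_eq_filter ls k hreal
  rw [hstep]
  have hmapflat : K.flatMap (fun k =>
        ((((PySem.List.enumerate ls).filter (psi (ls.map fKey))).filter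
            (fun p => fKey p.2 == k)).map (·.1)))
      = (K.flatMap (fun k =>
        (((PySem.List.enumerate ls).filter (psi (ls.map fKey))).filter
            (fun p => fKey p.2 == k)))).map (·.1) := by
    rw [List.map_flatMap]
  rw [hmapflat]
  have hcov : ∀ x ∈ ((PySem.List.enumerate ls).filter (psi (ls.map fKey))), fKey x.2 ∈ K := by
    intro x hx
    have hxE : x ∈ PySem.List.enumerate ls (0 : Int) := List.mem_of_mem_filter hx
    exact (PySem.Set.mem_ofList _ _).mpr (List.mem_map_of_mem hxE)
  have hperm := part_perm (fun p : Int × String => fKey p.2) K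
      ((PySem.List.enumerate ls).filter (psi (ls.map fKey))) hKnodup hcov
  have hpermIdx := hperm.map (fun p : Int × String => p.1)
  exact PySem.List.sorted_eq_of_perm_of_pairwise_lt _ _ _ hpermIdx.symm (keptIdx_pairwise ls)

-- ===== VERDICT (by name: the statement is the Claim_ definition above) =====
theorem strip_duplicate_sections_spec : Claim_equal_strip_duplicate_sections := by
  intro answer _
  unfold Spec_strip_duplicate_sections strip_duplicate_sections strip_duplicate_sections_alt
  set ls := PySem.Str.splitlines answer with hls
  show PySem.Str.join "\n" _ = PySem.Str.join "\n" _
  refine congrArg (PySem.Str.join "\n") ?_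
  have hM : (((PySem.List.enumerate ls).filter (psi (ls.map fKey))).map (·.2))
      = gSpec fKey qSrc [] ls := by
    have := filt_eq_gSpec fKey qSrc ls [] (ls.map fKey) (by simp)
    simpa [psi] using this
  have hA : (ls.foldl
      (fun (st : PySem.Set String × List String) line =>
        let key := PySem.Str.lower (PySem.Str.strip line)
        if PySem.Set.contains st.1 key && PySem.Str.startswith key "_sources:_" then st
        else (PySem.Set.add st.1 key, st.2 ++ [line]))
      (PySem.Set.empty, [])).2 = gSpec fKey qSrc [] ls :=
    foldA_eq_gSpec fKey qSrc ls PySem.Set.empty [] []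
      (by intro x; simp [PySem.Set.contains, PySem.Set.empty])
  have hB0 := congrArg (List.map (fun i => PySem.List.pyGetD ls i "")) (keepS_eq ls)
  have hB1 : ((((PySem.List.enumerate ls).filter (psi (ls.map fKey))).map (·.1)).map
        (fun i => PySem.List.pyGetD ls i ""))
      = (((PySem.List.enumerate ls).filter (psi (ls.map fKey))).map (·.2)) := by
    rw [List.map_map]
    apply List.map_congr_left
    intro p hp
    exact line_at_mem ls p (List.mem_of_mem_filter hp)
  exact hA.trans (hM.symm.trans ((hB0.trans hB1).symm))
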